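-- pv_equiv track=rewrite | github.com/rnbguy-zz/cryptoETF | Email1/2ETFalgo1stemail.py | _find_exit_orders
-- ===== SOURCE A (Python) =====
-- from typing import Dict, List, Optional, Tuple
--
-- def _find_exit_orders(open_orders: list) -> Tuple[Optional[dict], Optional[dict]]:
--     tp = None
--     sl = None
--     for o in open_orders:
--         t = (o.get("type") or "").upper()
--         if tp is None and t in ("LIMIT", "LIMIT_MAKER"):
--             tp = o
--         if sl is None and t in ("STOP_LOSS", "STOP_LOSS_LIMIT"):
--             sl = o
--     return tp, sl
-- ===== SOURCE B (Python) =====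
-- from typing import Dict, List, Optional, Tuple
--
-- def _find_exit_orders(open_orders: list) -> Tuple[Optional[dict], Optional[dict]]:
--     def first(types):
--         return next((o for o in open_orders
--                      if (o.get("type") or "").upper() in types), None)
--     return first(("LIMIT", "LIMIT_MAKER")), first(("STOP_LOSS", "STOP_LOSS_LIMIT"))
-- ===== Notes on version B (the rewrite author's own statement) =====
-- stated objective: idiomatic
-- what changed: Replaced the single latching loop with two independent first-match searches (next over a generator) for the limit and stop-loss order types.
import Mathlib
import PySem

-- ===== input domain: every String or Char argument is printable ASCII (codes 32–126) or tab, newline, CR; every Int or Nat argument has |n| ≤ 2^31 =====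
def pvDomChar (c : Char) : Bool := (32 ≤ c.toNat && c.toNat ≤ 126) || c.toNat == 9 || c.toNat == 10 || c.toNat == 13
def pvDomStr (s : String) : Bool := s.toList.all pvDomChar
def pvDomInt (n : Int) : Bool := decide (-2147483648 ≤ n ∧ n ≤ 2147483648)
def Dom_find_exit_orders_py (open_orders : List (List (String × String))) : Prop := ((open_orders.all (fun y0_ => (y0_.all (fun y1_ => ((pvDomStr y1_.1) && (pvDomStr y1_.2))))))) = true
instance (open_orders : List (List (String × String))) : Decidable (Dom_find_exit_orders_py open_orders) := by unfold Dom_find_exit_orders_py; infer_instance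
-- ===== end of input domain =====

-- ===== PORT A =====
-- B rewrites A's single latching loop as two independent first-match searches (idiomatic decomposition).
-- (o.get("type") or "").upper(): None and "" both normalize to "" (getD "" is exact here since "" is the only falsy string)
def pvOrderType (o : List (String × String)) : String :=
  PySem.Str.upper (((PySem.Dict.mk o).get? "type").getD "")

def find_exit_orders_py (open_orders : List (List (String × String))) : (Option (List (String × String))) × (Option (List (String × String))) :=
  open_orders.foldl (fun s o =>
    let t := pvOrderType o
    let tp := if s.1 = none ∧ (t = "LIMIT" ∨ t = "LIMIT_MAKER") then some o else s.1
    let sl := if s.2 = none ∧ (t = "STOP_LOSS" ∨ t = "STOP_LOSS_LIMIT") then some o else s.2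
    (tp, sl)) (none, none)

-- ===== PORT B =====
def pvIsTP (o : List (String × String)) : Bool :=
  pvOrderType o = "LIMIT" || pvOrderType o = "LIMIT_MAKER"

def pvIsSL (o : List (String × String)) : Bool :=
  pvOrderType o = "STOP_LOSS" || pvOrderType o = "STOP_LOSS_LIMIT"

def find_exit_orders_py_alt (open_orders : List (List (String × String))) : (Option (List (String × String))) × (Option (List (String × String))) :=
  (open_orders.find? pvIsTP, open_orders.find? pvIsSL)

-- ===== PRECONDITION & SPEC =====
def Spec_find_exit_orders_py (open_orders : List (List (String × String))) (out : (Option (List (String × String))) × (Option (List (String × String)))) : Prop := out = find_exit_orders_py_alt open_orders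
instance (open_orders : List (List (String × String))) (out : (Option (List (String × String))) × (Option (List (String × String)))) : Decidable (Spec_find_exit_orders_py open_orders out) := by unfold Spec_find_exit_orders_py; infer_instance

-- ===== CLAIM (what is proved, stated in full; the proofs are below) =====
def Claim_equal_find_exit_orders_py : Prop := ∀ (open_orders : List (List (String × String))), Dom_find_exit_orders_py open_orders → Spec_find_exit_orders_py open_orders (find_exit_orders_py open_orders)

-- ===== LEMMAS AND PROOFS =====
-- Invariant of A's latching loop: folding from state (tp, sl) fills each slot,
-- if still empty, with the first matching order of the rest of the list.
theorem pv_fold_inv (xs : List (List (String × String))) :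
    ∀ tp sl, xs.foldl (fun s o =>
      let t := pvOrderType o
      let tp := if s.1 = none ∧ (t = "LIMIT" ∨ t = "LIMIT_MAKER") then some o else s.1
      let sl := if s.2 = none ∧ (t = "STOP_LOSS" ∨ t = "STOP_LOSS_LIMIT") then some o else s.2
      (tp, sl)) (tp, sl)
    = (tp.orElse (fun _ => xs.find? pvIsTP), sl.orElse (fun _ => xs.find? pvIsSL)) := by
  induction xs with
  | nil => intro tp sl; cases tp <;> cases sl <;> simp [Option.orElse]
  | cons o xs ih =>
    intro tp sl
    simp only [List.foldl_cons, List.find?]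
    rw [ih]
    cases tp <;> cases sl <;>
      by_cases h1 : pvIsTP o <;> by_cases h2 : pvIsSL o <;>
      simp_all [pvIsTP, pvIsSL, Option.orElse] <;>
      (try rcases h1 with h1 | h1) <;> (try rcases h2 with h2 | h2) <;> simp_all

-- ===== VERDICT (by name: the statement is the Claim_ definition above) =====
theorem find_exit_orders_py_spec : Claim_equal_find_exit_orders_py := by
  intro open_orders _
  unfold Spec_find_exit_orders_py find_exit_orders_py find_exit_orders_py_alt
  rw [pv_fold_inv]
  simp [Option.orElse]
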